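-- pv_equiv track=rewrite | github.com/virous360/TI-83-premium-CE-scripts | before-2023/fonctions/ftable2.py | multiply_signs
-- ===== SOURCE A (Python) =====
-- def multiply_signs(list_signs:list[str]):
--     #get list by column instead of rows
--     list_index = []
--     for i in range(len(list_signs[0])):
--         list_index.append([])
--         for sign_a in list_signs:
--             list_index[i].append(sign_a[i])
--     # make a calc of each index
--     final = []
--     for i in list_index:
--         temp = 1
--         for x in i:
--             if x == "-":
--                 temp *= -1
--         if temp == -1:
--             final.append("-")
--         else:
--             final.append("+")
--     return final
-- ===== SOURCE B (Python) =====
-- def multiply_signs(list_signs: list[str]):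
--     # Row-major single pass: fold the rows into one per-column parity vector
--     # (XOR accumulator), instead of transposing and scanning each column.
--     parity = [False] * len(list_signs[0])
--     for row in list_signs:
--         parity = [p ^ (row[j] == "-") for j, p in enumerate(parity)]
--     return ["-" if p else "+" for p in parity]
-- ===== Notes on version B (the rewrite author's own statement) =====
-- stated objective: alternative
-- what changed: Replaces A's transpose-then-scan-each-column (building an explicit column matrix and folding a running *= -1 product over each column) with a single row-major pass that folds every row into one per-column boolean parity accumulator via XOR; no intermediate matrix and no column scans.
import Mathlib
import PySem

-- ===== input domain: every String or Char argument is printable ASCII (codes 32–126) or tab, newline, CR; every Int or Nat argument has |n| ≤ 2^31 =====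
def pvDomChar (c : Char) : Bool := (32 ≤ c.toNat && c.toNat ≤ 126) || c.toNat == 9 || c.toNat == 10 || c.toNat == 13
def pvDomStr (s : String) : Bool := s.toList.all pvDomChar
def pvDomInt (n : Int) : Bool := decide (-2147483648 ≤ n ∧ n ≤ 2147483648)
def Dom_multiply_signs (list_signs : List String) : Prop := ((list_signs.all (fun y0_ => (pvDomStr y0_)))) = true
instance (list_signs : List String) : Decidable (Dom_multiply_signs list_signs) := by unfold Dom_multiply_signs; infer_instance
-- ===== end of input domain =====

-- B replaces A's transpose-then-column-scan with a single row-major fold into a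
-- per-column XOR parity accumulator (objective: alternative, same cost).

-- ===== PORT A =====
-- A: build the transposed column matrix, then fold a running ±1 product over each column.
def multiply_signs (list_signs : List String) : List String :=
  let list_index : List (List Char) :=
    (List.range (list_signs.headD "").length).map
      (fun i => list_signs.map (fun sign_a => ((PySem.Str.pyGet? sign_a (Int.ofNat i)).getD ' ')))
  list_index.map (fun col =>
    let temp : Int := col.foldl (fun t x => if x = '-' then t * (-1) else t) 1
    if temp = -1 then "-" else "+")

-- ===== PORT B =====
-- B: fold every row into one boolean parity vector via XOR, then render it.
-- the per-row XOR step (B's list comprehension over enumerate(parity))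
def pvStep (p : List Bool) (row : String) : List Bool :=
  (PySem.List.enumerate p).map
    (fun jp => xor jp.2 (((PySem.Str.pyGet? row jp.1).getD ' ') == '-'))

def multiply_signs_alt (list_signs : List String) : List String :=
  let parity0 : List Bool := List.replicate (list_signs.headD "").length false
  let parity : List Bool := list_signs.foldl pvStep parity0
  parity.map (fun p => if p then "-" else "+")

-- ===== PRECONDITION & SPEC =====
-- Pre_ excludes exactly the inputs where Python A raises IndexError: the empty
-- outer list (list_signs[0]) and ragged inputs with a row shorter than row 0.
def Pre_multiply_signs (list_signs : List String) : Prop :=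
  list_signs ≠ [] ∧ ∀ s ∈ list_signs, (list_signs.headD "").length ≤ s.length
instance (list_signs : List String) : Decidable (Pre_multiply_signs list_signs) := by
  unfold Pre_multiply_signs; infer_instance
def pvWitness_multiply_signs : List String := ["+-", "-+", "--"]
def Spec_multiply_signs (list_signs : List String) (out : List String) : Prop := out = multiply_signs_alt list_signs
instance (list_signs : List String) (out : List String) : Decidable (Spec_multiply_signs list_signs out) := by unfold Spec_multiply_signs; infer_instance

-- ===== CLAIM (what is proved, stated in full; the proofs are below) =====
def Claim_equal_multiply_signs : Prop := ∀ (list_signs : List String), Dom_multiply_signs list_signs → Pre_multiply_signs list_signs → Spec_multiply_signs list_signs (multiply_signs list_signs)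

-- ===== LEMMAS AND PROOFS =====

-- number of '-' in column j across the rows
def pvColCnt (rows : List String) (j : Int) : Nat :=
  (rows.map (fun s => ((PySem.Str.pyGet? s j).getD ' '))).count '-'

theorem pvStep_getElem? (p : List Bool) (row : String) (j : Nat) :
    (pvStep p row)[j]? =
      p[j]?.map (fun b => xor b (((PySem.Str.pyGet? row (Int.ofNat j)).getD ' ') == '-')) := by
  cases hp : p[j]? <;>
    simp [pvStep, List.getElem?_map, PySem.List.getElem?_enumerate, hp]

theorem foldl_pvStep_getElem? (rows : List String) (p : List Bool) (j : Nat) :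
    (rows.foldl pvStep p)[j]? =
      p[j]?.map (fun b => xor b (decide (pvColCnt rows (Int.ofNat j) % 2 = 1))) := by
  induction rows generalizing p with
  | nil =>
    simp [pvColCnt]
  | cons r rows ih =>
    rw [List.foldl_cons, ih (pvStep p r), pvStep_getElem? p r j]
    have hcnt : pvColCnt (r :: rows) (Int.ofNat j)
        = (if ((PySem.Str.pyGet? r (Int.ofNat j)).getD ' ') = '-' then 1 else 0)
          + pvColCnt rows (Int.ofNat j) := by
      simp [pvColCnt, List.count_cons]
      split_ifs <;> simp_all <;> omega
    have hg : (PySem.Str.pyGet? r (Int.ofNat j)).getD ' ' = r.toList[j]?.getD ' ' := by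
      simp [PySem.Str.pyGet?]
    rw [hg] at hcnt
    rw [hcnt]
    have hpar : ∀ c : Nat, decide ((1 + c) % 2 = 1) = !decide (c % 2 = 1) := by
      intro c; by_cases h : c % 2 = 1 <;> simp [h] <;> omega
    cases hp : p[j]? with
    | none => simp
    | some b =>
      have hb : (r.toList[j]?.getD ' ' == '-') = decide (r.toList[j]?.getD ' ' = '-') := by
        by_cases h : r.toList[j]?.getD ' ' = '-' <;> simp [h]
      by_cases hr : (r.toList[j]?.getD ' ') = '-' <;> cases b <;>
        simp [hb, hr, hpar]

-- A's running product over a column equals (-1) to the number of '-' in it.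
theorem foldl_sign_eq_pow (l : List Char) (t : Int) :
    l.foldl (fun t x => if x = '-' then t * (-1) else t) t = t * (-1) ^ (l.count '-') := by
  induction l generalizing t with
  | nil => simp
  | cons c l ih =>
    simp only [List.foldl_cons, List.count_cons, ih]
    by_cases h : c = '-' <;> simp [h, pow_succ, mul_comm]

theorem neg_one_pow_eq_neg_one_iff (c : Nat) : ((-1 : Int) ^ c = -1) ↔ c % 2 = 1 := by
  rcases Nat.even_or_odd c with h | h
  · simp [h.neg_one_pow, Nat.even_iff.mp h]
  · simp [h.neg_one_pow, Nat.odd_iff.mp h]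

-- ===== VERDICT (by name: the statement is the Claim_ definition above) =====
theorem multiply_signs_spec : Claim_equal_multiply_signs := by
  intro list_signs _ _
  unfold Spec_multiply_signs multiply_signs multiply_signs_alt
  simp only [List.map_map]
  set n := (list_signs.headD "").length with hn
  apply List.ext_getElem?
  intro j
  rw [List.getElem?_map, List.getElem?_map,
    foldl_pvStep_getElem? list_signs (List.replicate n false) j]
  by_cases hj : j < n
  · rw [List.getElem?_range hj]
    simp only [List.getElem?_replicate, hj, if_pos, Option.map_some]
    simp only [Function.comp, foldl_sign_eq_pow, one_mul, Bool.false_xor]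
    simp only [neg_one_pow_eq_neg_one_iff]
    simp [pvColCnt]
  · rw [List.getElem?_eq_none (by simpa using hj)]
    simp [hj]
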